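-- pv_equiv track=rewrite | github.com/sethafancher/BrainGu_Toy_Problems | src/2021/june/4/blackjack_highest.py | blackjack_highest
-- ===== SOURCE A (Python) =====
-- def blackjack_highest(str):
--   cardMap = {"two": 2, "three": 3, "four": 4, "five": 5, "six": 6, "seven": 7, "eight": 8,
--   "nine": 9, "ten": 10, "jack": 10, "queen": 10, "king": 10, "ace": 11}
--   total = 0
--   aceIndex = -1
--   highestCard = "two"
--   result = ""
--   sawJack = False
--   sawQueen = False
--   sawKing = False
--   # loop
--   for i in range(len(str)):
--     if str[i] == "ace":
--       aceIndex = i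
--     else:
--       if cardMap[str[i]] > cardMap[highestCard]:
--         highestCard = str[i]
--       if str[i] == "jack":
--         sawJack = True
--       elif str[i] == "queen":
--         sawQueen = True
--       elif str[i] == "king":
--         sawKing = True
--       total += cardMap[str[i]]
--   # deal with aces
--   if aceIndex != -1:
--     if total + cardMap["ace"] > 21:
--       total += 1
--     else:
--       total += 11
--       highestCard = "ace"
--   # deal with tied faces
--   if highestCard != "ace" and sawKing:
--     highestCard = "king"
--   elif highestCard != "ace" and sawQueen:
--     highestCard = "queen"
--   elif highestCard != "ace" and sawJack:
--     highestCard = "jack"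
--   else:
--     highestCard = highestCard
--   # deal with result
--   if total > 21:
--     result = "above "
--   elif total < 21:
--     result = "below "
--   else:
--     result = "blackjack "
--   return result + highestCard
-- ===== SOURCE B (Python) =====
-- def blackjack_highest(str):
--   cardMap = {"two": 2, "three": 3, "four": 4, "five": 5, "six": 6, "seven": 7, "eight": 8,
--   "nine": 9, "ten": 10, "jack": 10, "queen": 10, "king": 10, "ace": 11}
--   total = sum(cardMap[c] for c in str if c != "ace")
--   cards = set(str)
--   priority = ["king", "queen", "jack", "ten", "nine", "eight", "seven", "six", "five", "four", "three", "two"]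
--   highest = next((c for c in priority if c in cards), "two")
--   if any(c == "ace" for c in str):
--     if total + 11 > 21:
--       total += 1
--     else:
--       total += 11
--       highest = "ace"
--   prefix = "above " if total > 21 else ("below " if total < 21 else "blackjack ")
--   return prefix + highest
-- ===== Notes on version B (the rewrite author's own statement) =====
-- stated objective: simpler
-- what changed: B replaces A's stateful single pass (running total, ace index, running highest card plus three saw-face flags and a post-hoc tie-fix chain) with independent whole-list computations: a sum over non-ace cards, an any() ace test, and the highest card read off a fixed priority list against the set of cards.
import Mathlib
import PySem

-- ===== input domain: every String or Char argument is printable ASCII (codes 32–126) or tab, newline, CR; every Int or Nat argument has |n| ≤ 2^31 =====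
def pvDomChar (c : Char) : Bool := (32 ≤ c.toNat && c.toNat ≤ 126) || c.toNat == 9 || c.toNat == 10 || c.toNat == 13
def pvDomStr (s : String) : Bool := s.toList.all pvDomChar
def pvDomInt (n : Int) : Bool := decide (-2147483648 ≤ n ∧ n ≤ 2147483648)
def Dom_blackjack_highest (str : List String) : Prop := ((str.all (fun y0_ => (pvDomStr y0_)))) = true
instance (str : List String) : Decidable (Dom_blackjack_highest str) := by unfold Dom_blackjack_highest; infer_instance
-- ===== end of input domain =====

-- B computes total/ace/highest as independent whole-list queries (sum over non-aces, any-ace,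
-- first present card of a fixed priority list) instead of A's stateful pass with flag fix-ups; objective: simpler.


-- ===== PORT A =====
-- shared helper: the cardMap dict both Pythons define, looked up totally (Pre_ keeps inputs
-- inside its keys, where getD equals Python's raising cardMap[c])
def bjMap : PySem.Dict String Int :=
  PySem.Dict.ofList [("two", 2), ("three", 3), ("four", 4), ("five", 5), ("six", 6), ("seven", 7),
    ("eight", 8), ("nine", 9), ("ten", 10), ("jack", 10), ("queen", 10), ("king", 10), ("ace", 11)]

def cardVal (c : String) : Int := bjMap.getD c 0

-- A's loop "for i in range(len(str))", state = (total, aceIndex, highestCard, sawJack, sawQueen, sawKing)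
def bjLoopA : List String → Nat → Int → Int → String → Bool → Bool → Bool →
    Int × Int × String × Bool × Bool × Bool
  | [], _, total, aceIndex, hc, sJ, sQ, sK => (total, aceIndex, hc, sJ, sQ, sK)
  | c :: rest, i, total, aceIndex, hc, sJ, sQ, sK =>
    if c = "ace" then
      bjLoopA rest (i + 1) total (i : Int) hc sJ sQ sK
    else
      let hc' := if cardVal c > cardVal hc then c else hc
      let fl := if c = "jack" then (true, sQ, sK)
                else if c = "queen" then (sJ, true, sK)
                else if c = "king" then (sJ, sQ, true)
                else (sJ, sQ, sK)
      bjLoopA rest (i + 1) (total + cardVal c) aceIndex hc' fl.1 fl.2.1 fl.2.2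

def blackjack_highest (str : List String) : String :=
  let s := bjLoopA str 0 0 (-1) "two" false false false
  let total0 := s.1
  let aceIndex := s.2.1
  let hc0 := s.2.2.1
  let sJ := s.2.2.2.1
  let sQ := s.2.2.2.2.1
  let sK := s.2.2.2.2.2
  -- deal with aces
  let ta := if aceIndex ≠ -1 then
              (if total0 + cardVal "ace" > 21 then (total0 + 1, hc0) else (total0 + 11, "ace"))
            else (total0, hc0)
  let total := ta.1
  let hc1 := ta.2
  -- deal with tied faces
  let highest := if hc1 ≠ "ace" ∧ sK = true then "king"
                 else if hc1 ≠ "ace" ∧ sQ = true then "queen"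
                 else if hc1 ≠ "ace" ∧ sJ = true then "jack"
                 else hc1
  -- deal with result
  let result := if total > 21 then "above " else if total < 21 then "below " else "blackjack "
  result ++ highest

-- ===== PORT B =====
def bjPriority : List String :=
  ["king", "queen", "jack", "ten", "nine", "eight", "seven", "six", "five", "four", "three", "two"]

def blackjack_highest_alt (str : List String) : String :=
  let total0 := (str.filter (fun c => c ≠ "ace")).foldl (fun t c => t + cardVal c) 0
  let cards := PySem.Set.ofList str
  let highest0 := (bjPriority.find? (fun c => PySem.Set.contains cards c)).getD "two"
  let th := if str.any (fun c => c == "ace") then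
              (if total0 + 11 > 21 then (total0 + 1, highest0) else (total0 + 11, "ace"))
            else (total0, highest0)
  let pre := if th.1 > 21 then "above " else if th.1 < 21 then "below " else "blackjack "
  pre ++ th.2

-- ===== PRECONDITION & SPEC =====
-- Pre_ excludes exactly the hands containing a card name outside cardMap's keys, on which
-- Python A raises KeyError (and Python B raises KeyError too).
def Pre_blackjack_highest (str : List String) : Prop :=
  ∀ c ∈ str, c ∈ ["two", "three", "four", "five", "six", "seven", "eight", "nine", "ten",
                  "jack", "queen", "king", "ace"]
instance (str : List String) : Decidable (Pre_blackjack_highest str) := by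
  unfold Pre_blackjack_highest; infer_instance

def pvWitness_blackjack_highest : List String := ["ace", "king", "ten", "queen"]

def Spec_blackjack_highest (str : List String) (out : String) : Prop := out = blackjack_highest_alt str
instance (str : List String) (out : String) : Decidable (Spec_blackjack_highest str out) := by unfold Spec_blackjack_highest; infer_instance

-- ===== CLAIM (what is proved, stated in full; the proofs are below) =====
def Claim_equal_blackjack_highest : Prop := ∀ (str : List String), Dom_blackjack_highest str → Pre_blackjack_highest str → Spec_blackjack_highest str (blackjack_highest str)

-- ===== LEMMAS AND PROOFS =====

def bjLow : List String :=
  ["two", "three", "four", "five", "six", "seven", "eight", "nine", "ten"]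

-- total component of A's loop
theorem bjLoopA_total (l : List String) : ∀ (i : Nat) (t a : Int) (hc : String) (j q k : Bool),
    (bjLoopA l i t a hc j q k).1 = (l.filter (fun c => c ≠ "ace")).foldl (fun t c => t + cardVal c) t := by
  induction l with
  | nil => intros; simp [bjLoopA]
  | cons c rest ih =>
    intro i t a hc j q k
    by_cases h : c = "ace"
    · subst h; simp [bjLoopA, ih]
    · simp [bjLoopA, h, ih]

theorem bjLoopA_ace_gen (l : List String) : ∀ (i : Nat) (t a : Int) (hc : String) (j q k : Bool),
    (a = -1 ∨ 0 ≤ a) →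
    ((bjLoopA l i t a hc j q k).2.1 ≠ -1 ↔ (a ≠ -1 ∨ "ace" ∈ l)) := by
  induction l with
  | nil => intro i t a hc j q k _; simp [bjLoopA]
  | cons c rest ih =>
    intro i t a hc j q k ha
    by_cases h : c = "ace"
    · subst h
      rw [show bjLoopA ("ace" :: rest) i t a hc j q k = bjLoopA rest (i + 1) t (i : Int) hc j q k by simp [bjLoopA]]
      rw [ih (i + 1) t (i : Int) hc j q k (Or.inr (Int.natCast_nonneg i))]
      have hi : (i : Int) ≠ -1 := by omega
      simp [hi]
    · simp only [bjLoopA, if_neg h]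
      rw [ih (i + 1) (t + cardVal c) a _ _ _ _ ha]
      simp only [List.mem_cons]
      constructor
      · rintro (h1 | h1)
        · exact Or.inl h1
        · exact Or.inr (Or.inr h1)
      · rintro (h1 | h1 | h1)
        · exact Or.inl h1
        · exact absurd h1.symm h
        · exact Or.inr h1

-- face flags
theorem bjLoopA_flags (l : List String) : ∀ (i : Nat) (t a : Int) (hc : String) (j q k : Bool),
    (bjLoopA l i t a hc j q k).2.2.2.1 = (j || l.contains "jack") ∧
    (bjLoopA l i t a hc j q k).2.2.2.2.1 = (q || l.contains "queen") ∧
    (bjLoopA l i t a hc j q k).2.2.2.2.2 = (k || l.contains "king") := by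
  induction l with
  | nil => intros; simp [bjLoopA]
  | cons c rest ih =>
    intro i t a hc j q k
    by_cases h : c = "ace"
    · subst h; simp [bjLoopA, ih]
    · by_cases hj : c = "jack"
      · subst hj; simp [bjLoopA, ih]
      · by_cases hq : c = "queen"
        · subst hq; simp [bjLoopA, ih, h]
        · by_cases hk : c = "king"
          · subst hk; simp [bjLoopA, ih, h]
          · simp [bjLoopA, h, hj, hq, hk, ih]
            refine ⟨?_, ?_, ?_⟩ <;> congr 1 <;> simp
            · exact fun hx => (hj hx.symm).elim
            · exact fun hx => (hq hx.symm).elim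
            · exact fun hx => (hk hx.symm).elim

-- highestCard: its value is the running max over non-ace cards
theorem bjLoopA_hc_val (l : List String) : ∀ (i : Nat) (t a : Int) (hc : String) (j q k : Bool),
    cardVal (bjLoopA l i t a hc j q k).2.2.1 =
      (l.filter (fun c => c ≠ "ace")).foldl (fun m c => max m (cardVal c)) (cardVal hc) := by
  induction l with
  | nil => intros; simp [bjLoopA]
  | cons c rest ih =>
    intro i t a hc j q k
    by_cases h : c = "ace"
    · subst h; simp [bjLoopA, ih]
    · by_cases hgt : cardVal c > cardVal hc
      · simp [bjLoopA, h, hgt, ih]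
        congr 1
        omega
      · simp [bjLoopA, h, hgt, ih]
        congr 1
        omega

theorem bjLoopA_hc_mem (l : List String) : ∀ (i : Nat) (t a : Int) (hc : String) (j q k : Bool),
    (bjLoopA l i t a hc j q k).2.2.1 ∈ hc :: l.filter (fun c => c ≠ "ace") := by
  induction l with
  | nil => intros; simp [bjLoopA]
  | cons c rest ih =>
    intro i t a hc j q k
    by_cases h : c = "ace"
    · subst h; simpa [bjLoopA] using ih (i + 1) t (i : Int) hc j q k
    · simp only [bjLoopA, if_neg h]
      set fl := (if c = "jack" then (true, q, k)
                 else if c = "queen" then (j, true, k)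
                 else if c = "king" then (j, q, true) else (j, q, k)) with hfl
      obtain ⟨j', q', k'⟩ := fl
      by_cases hgt : cardVal c > cardVal hc
      · have := ih (i + 1) (t + cardVal c) a c j' q' k'
        simp [hgt, List.mem_cons, h] at this ⊢
        tauto
      · have := ih (i + 1) (t + cardVal c) a hc j' q' k'
        simp [hgt, List.mem_cons, h] at this ⊢
        tauto

-- generic facts about the running max
theorem foldl_max_ge (l : List String) : ∀ (m : Int),
    m ≤ l.foldl (fun m c => max m (cardVal c)) m := by
  induction l with
  | nil => intro m; simp
  | cons c rest ih =>
    intro m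
    calc m ≤ max m (cardVal c) := le_max_left _ _
    _ ≤ _ := by simpa using ih (max m (cardVal c))

theorem foldl_max_mem_le (l : List String) : ∀ (m : Int) (d : String), d ∈ l →
    cardVal d ≤ l.foldl (fun m c => max m (cardVal c)) m := by
  induction l with
  | nil => simp
  | cons c rest ih =>
    intro m d hd
    simp only [List.foldl_cons]
    rcases List.mem_cons.mp hd with rfl | hd2
    · exact le_trans (le_max_right m (cardVal d)) (foldl_max_ge rest (max m (cardVal d)))
    · exact ih (max m (cardVal c)) d hd2

theorem foldl_max_attained (l : List String) : ∀ (m : Int),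
    l.foldl (fun m c => max m (cardVal c)) m = m ∨
      ∃ c ∈ l, l.foldl (fun m c => max m (cardVal c)) m = cardVal c := by
  induction l with
  | nil => intro m; simp
  | cons c rest ih =>
    intro m
    simp only [List.foldl_cons]
    rcases ih (max m (cardVal c)) with h | ⟨d, hd, h⟩
    · by_cases hle : cardVal c ≤ m
      · left; simpa [max_eq_left hle] using h
      · right
        exact ⟨c, by simp, by simpa [max_eq_right (le_of_not_ge hle)] using h⟩
    · right; exact ⟨d, by simp [hd], h⟩

-- find? on a list sorted non-increasingly by cardVal picks an element at least as valuable
-- as every other element satisfying the predicate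
theorem find?_max (p : String → Bool) : ∀ (P : List String),
    P.Pairwise (fun a b => cardVal b ≤ cardVal a) → ∀ r, P.find? p = some r →
    p r = true ∧ ∀ c ∈ P, p c = true → cardVal c ≤ cardVal r := by
  intro P
  induction P with
  | nil => simp
  | cons h t ih =>
    intro hp r hf
    obtain ⟨hle, hpt⟩ := List.pairwise_cons.mp hp
    by_cases hh : p h = true
    · rw [List.find?_cons_of_pos hh] at hf
      injection hf with hf
      subst hf
      refine ⟨hh, ?_⟩
      intro c hc hcp
      rcases List.mem_cons.mp hc with rfl | hc2
      · exact le_refl _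
      · exact hle _ hc2
    · rw [List.find?_cons_of_neg (by simpa using hh)] at hf
      obtain ⟨h1, h2⟩ := ih hpt r hf
      refine ⟨h1, ?_⟩
      intro c hc hcp
      rcases List.mem_cons.mp hc with rfl | hc2
      · exact absurd hcp hh
      · exact h2 _ hc2 hcp

theorem cardVal_low_inj : ∀ a ∈ bjLow, ∀ b ∈ bjLow, cardVal a = cardVal b → a = b := by decide

theorem bjLow_sub_pre : ∀ c ∈ ["two", "three", "four", "five", "six", "seven", "eight", "nine",
    "ten", "jack", "queen", "king", "ace"],
    c ≠ "ace" → c ≠ "jack" → c ≠ "queen" → c ≠ "king" → c ∈ bjLow := by decide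

theorem bjLow_sub_prio : ∀ c ∈ bjLow, c ∈ bjPriority := by decide

theorem bjLow_ge_two : ∀ c ∈ bjLow, (2 : Int) ≤ cardVal c := by decide

theorem bjLow_ne_ace : ∀ c ∈ bjLow, c ≠ "ace" := by decide

theorem bjPrio_cases : ∀ c ∈ bjPriority, c = "king" ∨ c = "queen" ∨ c = "jack" ∨ c ∈ bjLow := by
  decide

theorem bjPrio_pairwise : bjPriority.Pairwise (fun a b => cardVal b ≤ cardVal a) := by decide

theorem bj_main (str : List String) (hpre : Pre_blackjack_highest str) :
    blackjack_highest str = blackjack_highest_alt str := by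
  have hAce11 : cardVal "ace" = 11 := by decide
  have cardVal_two : cardVal "two" = 2 := by decide
  simp only [blackjack_highest, blackjack_highest_alt]
  set F := str.filter (fun c => c ≠ "ace") with hF
  set p : String → Bool := fun c => PySem.Set.contains (PySem.Set.ofList str) c with hpdef
  set s := bjLoopA str 0 0 (-1) "two" false false false with hs
  have hp : ∀ c, p c = true ↔ c ∈ str := by
    intro c; simp [hpdef, PySem.Set.contains, PySem.Set.mem_ofList]
  have hFsub : ∀ c ∈ F, c ∈ str := fun c hc => List.mem_of_mem_filter hc
  have hFne : ∀ c ∈ F, c ≠ "ace" := by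
    intro c hc
    simpa using List.of_mem_filter hc
  have hT : s.1 = F.foldl (fun t c => t + cardVal c) 0 :=
    bjLoopA_total str 0 0 (-1) "two" false false false
  have hA : (s.2.1 ≠ -1) ↔ "ace" ∈ str := by
    rw [hs, bjLoopA_ace_gen str 0 0 (-1) "two" false false false (Or.inl rfl)]
    simp
  have hFl := bjLoopA_flags str 0 0 (-1) "two" false false false
  have hVal : cardVal s.2.2.1 = F.foldl (fun m c => max m (cardVal c)) (cardVal "two") :=
    bjLoopA_hc_val str 0 0 (-1) "two" false false false
  have hMem : s.2.2.1 ∈ "two" :: F :=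
    bjLoopA_hc_mem str 0 0 (-1) "two" false false false
  have hc0ne : s.2.2.1 ≠ "ace" := by
    rcases List.mem_cons.mp hMem with h | h
    · rw [h]; decide
    · exact hFne _ h
  have hsj : s.2.2.2.1 = str.contains "jack" := by rw [hFl.1]; simp
  have hsq : s.2.2.2.2.1 = str.contains "queen" := by rw [hFl.2.1]; simp
  have hsk : s.2.2.2.2.2 = str.contains "king" := by rw [hFl.2.2]; simp
  -- the tied-faces fix-up of A equals B's priority scan
  have hr : (if s.2.2.1 ≠ "ace" ∧ s.2.2.2.2.2 = true then "king"
             else if s.2.2.1 ≠ "ace" ∧ s.2.2.2.2.1 = true then "queen"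
             else if s.2.2.1 ≠ "ace" ∧ s.2.2.2.1 = true then "jack"
             else s.2.2.1) = (bjPriority.find? p).getD "two" := by
    by_cases hk : "king" ∈ str
    · have hfind : bjPriority.find? p = some "king" :=
        List.find?_cons_of_pos ((hp "king").mpr hk)
      simp [hfind, hc0ne, hsk, hk]
    · have hpk : p "king" = false := by
        rw [← Bool.not_eq_true]; simp [hp, hk]
      by_cases hq : "queen" ∈ str
      · have hfind : bjPriority.find? p = some "queen" := by
          simp [bjPriority, List.find?, hpk, (hp "queen").mpr hq]
        simp [hfind, hc0ne, hsk, hsq, hk, hq]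
      · have hpq : p "queen" = false := by
          rw [← Bool.not_eq_true]; simp [hp, hq]
        by_cases hj : "jack" ∈ str
        · have hfind : bjPriority.find? p = some "jack" := by
            simp [bjPriority, List.find?, hpk, hpq, (hp "jack").mpr hj]
          simp [hfind, hc0ne, hsk, hsq, hsj, hk, hq, hj]
        · -- no face cards: both sides reduce to the max-valued low card
          have hFlow : ∀ c ∈ F, c ∈ bjLow := by
            intro c hc
            refine bjLow_sub_pre c (hpre c (hFsub c hc)) (hFne c hc) ?_ ?_ ?_
            · exact fun h => hj (h ▸ hFsub c hc)
            · exact fun h => hq (h ▸ hFsub c hc)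
            · exact fun h => hk (h ▸ hFsub c hc)
          have hc0low : s.2.2.1 ∈ bjLow := by
            rcases List.mem_cons.mp hMem with h | h
            · rw [h]; decide
            · exact hFlow _ h
          have hskf : ¬("king" ∈ str) := hk
          rcases hfind : bjPriority.find? p with _ | r0
          · have hnone := List.find?_eq_none.mp hfind
            have hFnil : F = [] := by
              rcases List.eq_nil_or_concat F with h | ⟨l2, c, h⟩
              · exact h
              · exfalso
                have hcF : c ∈ F := by rw [h]; simp
                exact hnone c (bjLow_sub_prio c (hFlow c hcF)) ((hp c).mpr (hFsub c hcF))
            have hc0two : s.2.2.1 = "two" := by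
              rcases List.mem_cons.mp hMem with h | h
              · exact h
              · rw [hFnil] at h; simp at h
            simp [hc0two, hsk, hsq, hsj, hk, hq, hj]
          · obtain ⟨hpr0, hmax⟩ := find?_max p bjPriority bjPrio_pairwise r0 hfind
            have hr0str : r0 ∈ str := (hp r0).mp hpr0
            have hr0prio : r0 ∈ bjPriority := List.mem_of_find?_eq_some hfind
            have hr0low : r0 ∈ bjLow := by
              rcases bjPrio_cases r0 hr0prio with h | h | h | h
              · exact absurd (h ▸ hr0str) hk
              · exact absurd (h ▸ hr0str) hq
              · exact absurd (h ▸ hr0str) hj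
              · exact h
            have hr0F : r0 ∈ F := by
              rw [hF]
              exact List.mem_filter.mpr ⟨hr0str, by simpa using bjLow_ne_ace r0 hr0low⟩
            have hle1 : cardVal r0 ≤ F.foldl (fun m c => max m (cardVal c)) (cardVal "two") :=
              foldl_max_mem_le F _ r0 hr0F
            have hle2 : F.foldl (fun m c => max m (cardVal c)) (cardVal "two") ≤ cardVal r0 := by
              rcases foldl_max_attained F (cardVal "two") with h | ⟨c, hc, h⟩
              · rw [h, cardVal_two]; exact bjLow_ge_two r0 hr0low
              · rw [h]
                exact hmax c (bjLow_sub_prio c (hFlow c hc)) ((hp c).mpr (hFsub c hc))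
            have hc0r0 : s.2.2.1 = r0 :=
              cardVal_low_inj _ hc0low _ hr0low (by rw [hVal]; omega)
            simp [hc0r0, hsk, hsq, hsj, hk, hq, hj]
  -- assemble: align the ace tests, then the totals, then the final string
  have hany : (str.any (fun c => c == "ace") = true) ↔ "ace" ∈ str := by simp
  by_cases hace : "ace" ∈ str
  · have h1 : s.2.1 ≠ -1 := hA.mpr hace
    have h2 : str.any (fun c => c == "ace") = true := hany.mpr hace
    rw [if_pos h1, if_pos h2, hAce11, hT]
    by_cases h21 : F.foldl (fun t c => t + cardVal c) 0 + 11 > 21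
    · rw [← hr]
      simp [h21]
    · rw [← hr]
      simp [h21]
  · have h1 : ¬(s.2.1 ≠ -1) := fun h => hace (hA.mp h)
    have h2 : ¬(str.any (fun c => c == "ace") = true) := fun h => hace (hany.mp h)
    rw [if_neg h1, if_neg h2, hT, hr]

-- ===== VERDICT (by name: the statement is the Claim_ definition above) =====
theorem blackjack_highest_spec : Claim_equal_blackjack_highest := by
  intro str _ hpre
  exact bj_main str hpre
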